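-- pv_equiv track=rewrite | github.com/0520hy/Algorithm | 프로그래머스/0/181932. 코드 처리하기/코드 처리하기.py | solution
-- ===== SOURCE A (Python) =====
-- def solution(code):
--     answer = []
--     mode = 0
--
--     for i, char in enumerate(code):
--         if char == '1':
--             mode ^= 1
--         elif i % 2 == mode:
--             answer.append(char)
--
--     return ''.join(answer) if answer else 'EMPTY'
-- ===== SOURCE B (Python) =====
-- def solution(code):
--     # prefix-parity table: parities[i] = parity of '1's strictly before index i
--     ones = 0
--     parities = []
--     for c in code:
--         parities.append(ones & 1)
--         if c == '1':
--             ones += 1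
--     kept = [c for i, (c, p) in enumerate(zip(code, parities))
--             if c != '1' and i % 2 == p]
--     return ''.join(kept) or 'EMPTY'
-- ===== Notes on version B (the rewrite author's own statement) =====
-- stated objective: alternative
-- what changed: Replaces the single stateful toggle loop by a two-phase decomposition: first a prefix table of toggle-count parities, then a stateless comprehension selecting characters whose index parity matches the table.
import Mathlib
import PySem

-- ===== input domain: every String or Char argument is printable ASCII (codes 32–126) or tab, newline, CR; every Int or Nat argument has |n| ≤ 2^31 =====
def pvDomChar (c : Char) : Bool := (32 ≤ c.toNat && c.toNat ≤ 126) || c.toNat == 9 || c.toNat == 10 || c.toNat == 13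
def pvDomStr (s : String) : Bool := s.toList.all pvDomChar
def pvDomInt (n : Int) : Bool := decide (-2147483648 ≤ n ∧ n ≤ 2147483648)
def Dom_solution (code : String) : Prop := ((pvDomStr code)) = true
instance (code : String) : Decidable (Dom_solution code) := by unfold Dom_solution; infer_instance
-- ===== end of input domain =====

-- ===== PORT A =====
-- B changes the decomposition only: a prefix-parity table plus a stateless selection pass, instead of A's single toggle loop (objective: alternative).
def solution (code : String) : String :=
  let r := (PySem.List.enumerate code.toList 0).foldl
    (fun (st : List Char × Int) ic =>
      if ic.2 == '1' then (st.1, PySem.Int.bxor st.2 1)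
      else if PySem.Int.mod ic.1 2 == st.2 then (st.1 ++ [ic.2], st.2)
      else st) ([], 0)
  if r.1.isEmpty then "EMPTY" else String.ofList r.1

-- ===== PORT B =====
def solution_alt (code : String) : String :=
  let parities := (code.toList.foldl
    (fun (st : Nat × List Nat) c =>
      (if c == '1' then st.1 + 1 else st.1, st.2 ++ [st.1 &&& 1])) (0, [])).2
  let kept := (PySem.List.enumerate (code.toList.zip parities) 0).filterMap
    (fun x => if x.2.1 != '1' && PySem.Int.mod x.1 2 == ((x.2.2 : Nat) : Int)
              then some x.2.1 else none)
  if kept.isEmpty then "EMPTY" else String.ofList kept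

-- ===== PRECONDITION & SPEC =====
def Spec_solution (code : String) (out : String) : Prop := out = solution_alt code
instance (code : String) (out : String) : Decidable (Spec_solution code out) := by unfold Spec_solution; infer_instance

-- ===== CLAIM (what is proved, stated in full; the proofs are below) =====
def Claim_equal_solution : Prop := ∀ (code : String), Dom_solution code → Spec_solution code (solution code)




-- ===== LEMMAS AND PROOFS =====

-- common specification: characters of l kept, starting at index i with `ones` ones seen so far
def selSpec : List Char → Nat → Nat → List Char
  | [], _, _ => []
  | c :: l, i, ones =>
    if c = '1' then selSpec l (i+1) (ones+1)
    else if i % 2 = ones % 2 then c :: selSpec l (i+1) ones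
    else selSpec l (i+1) ones

-- prefix-parity counts as B builds them
def parList : List Char → Nat → List Nat
  | [], _ => []
  | c :: l, ones => (ones &&& 1) :: parList l (if c = '1' then ones + 1 else ones)

theorem bxor_parity (ones : Nat) :
    PySem.Int.bxor (((ones % 2 : Nat) : Int)) 1 = (((ones + 1) % 2 : Nat) : Int) := by
  rcases Nat.mod_two_eq_zero_or_one ones with h | h
  · have h2 : (ones + 1) % 2 = 1 := by omega
    rw [h, h2]; decide
  · have h2 : (ones + 1) % 2 = 0 := by omega
    rw [h, h2]; decide

theorem cast_succ_idx (i : Nat) : ((i : Int) + 1) = (((i + 1 : Nat)) : Int) := by push_cast; ring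

theorem modcast (i : Nat) : PySem.Int.mod ((i : Nat) : Int) 2 = (((i % 2 : Nat)) : Int) := by
  simp

theorem beq_mod_true (i ones : Nat) (hm : i % 2 = ones % 2) :
    (PySem.Int.mod ((i : Nat) : Int) 2 == (((ones % 2 : Nat)) : Int)) = true := by
  rw [modcast, hm]; simp

theorem beq_mod_false (i ones : Nat) (hm : ¬ i % 2 = ones % 2) :
    (PySem.Int.mod ((i : Nat) : Int) 2 == (((ones % 2 : Nat)) : Int)) = false := by
  rw [modcast]; simp; omega

theorem loopA (l : List Char) (i : Nat) (acc : List Char) (ones : Nat) :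
    ((PySem.List.enumerate l ((i : Nat) : Int)).foldl
      (fun (st : List Char × Int) ic =>
        if ic.2 == '1' then (st.1, PySem.Int.bxor st.2 1)
        else if PySem.Int.mod ic.1 2 == st.2 then (st.1 ++ [ic.2], st.2)
        else st) (acc, ((ones % 2 : Nat) : Int))).1 = acc ++ selSpec l i ones := by
  induction l generalizing i acc ones with
  | nil => simp [PySem.List.enumerate_nil, selSpec]
  | cons c l ih =>
    rw [PySem.List.enumerate_cons, List.foldl_cons]
    by_cases hc : c = '1'
    · rw [selSpec, if_pos hc]
      simp only [hc, beq_self_eq_true, if_true, cast_succ_idx, bxor_parity]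
      exact ih (i + 1) acc (ones + 1)
    · have h1 : (c == '1') = false := by simp [hc]
      simp only [h1, Bool.false_eq_true, if_false, cast_succ_idx]
      by_cases hm : i % 2 = ones % 2
      · rw [selSpec, if_neg hc, if_pos hm, beq_mod_true i ones hm]
        simp only [if_true]
        rw [ih (i + 1) (acc ++ [c]) ones]
        simp
      · rw [selSpec, if_neg hc, if_neg hm, beq_mod_false i ones hm]
        simp only [Bool.false_eq_true, if_false]
        exact ih (i + 1) acc ones

theorem loopB_par (l : List Char) (ones : Nat) (ps : List Nat) :
    (l.foldl
      (fun (st : Nat × List Nat) c =>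
        (if c == '1' then st.1 + 1 else st.1, st.2 ++ [st.1 &&& 1])) (ones, ps)).2
      = ps ++ parList l ones := by
  induction l generalizing ones ps with
  | nil => simp [parList]
  | cons c l ih =>
    rw [List.foldl_cons, parList]
    by_cases hc : c = '1'
    · simp only [hc, beq_self_eq_true, if_true]
      rw [ih (ones + 1) (ps ++ [ones &&& 1])]
      simp
    · have h1 : (c == '1') = false := by simp [hc]
      simp only [h1, Bool.false_eq_true, if_false, if_neg hc]
      rw [ih ones (ps ++ [ones &&& 1])]
      simp

theorem loopB_sel (l : List Char) (i : Nat) (ones : Nat) :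
    (PySem.List.enumerate (l.zip (parList l ones)) ((i : Nat) : Int)).filterMap
      (fun x => if x.2.1 != '1' && (PySem.Int.mod x.1 2 == ((x.2.2 : Nat) : Int))
                then some x.2.1 else none) = selSpec l i ones := by
  induction l generalizing i ones with
  | nil => simp [parList, selSpec, PySem.List.enumerate_nil]
  | cons c l ih =>
    have hand : ones &&& 1 = ones % 2 := Nat.and_one_is_mod ones
    rw [parList, List.zip_cons_cons, PySem.List.enumerate_cons, List.filterMap_cons,
      cast_succ_idx]
    by_cases hc : c = '1'
    · have h2 : selSpec (c :: l) i ones = selSpec l (i + 1) (ones + 1) := by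
        rw [selSpec, if_pos hc]
      have h1 : (c != '1') = false := by simp [hc]
      rw [h2, if_pos hc]
      simp only [h1, Bool.false_and, Bool.false_eq_true, if_false]
      exact ih (i + 1) (ones + 1)
    · have h1 : (c != '1') = true := by simp [hc]
      simp only [h1, Bool.true_and, hand]
      by_cases hm : i % 2 = ones % 2
      · have h3 : ((i : Int) % 2 = (ones : Int) % 2) := by omega
        have h2 : selSpec (c :: l) i ones = c :: selSpec l (i + 1) ones := by
          rw [selSpec, if_neg hc, if_pos hm]
        rw [h2, if_neg hc]
        simp [h3]
        simpa using ih (i + 1) ones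
      · have h3 : ¬ ((i : Int) % 2 = (ones : Int) % 2) := by omega
        have h2 : selSpec (c :: l) i ones = selSpec l (i + 1) ones := by
          rw [selSpec, if_neg hc, if_neg hm]
        rw [h2, if_neg hc]
        simp [h3]
        simpa using ih (i + 1) ones

-- ===== VERDICT (by name: the statement is the Claim_ definition above) =====
theorem solution_spec : Claim_equal_solution := by
  intro code _
  unfold Spec_solution solution solution_alt
  have ha := loopA code.toList 0 [] 0
  have hb1 := loopB_par code.toList 0 []
  have hb2 := loopB_sel code.toList 0 0
  simp only [Nat.zero_mod, Nat.cast_zero, List.nil_append] at ha hb1 hb2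
  simp only [ha, hb1, hb2]
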